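-- pv_equiv track=rewrite | github.com/ang-cai/dinner | dinner.py | filter_bad_invites
-- ===== SOURCE A (Python) =====
-- def find_dislikes(friends: dict)->set[tuple]:
--     """Given a dictionary-based adjacency list of String-based nodes,
--        returns a set of all edges in the graph (ie. dislikes who can't be invited together).
--
--        Args:
--            friends: dictionary-based adjacency matrix representing friend relations
--
--        Returns:
--            A set of edges in the graph represented as tuples
--             - An edge should only appear once in the set.
--             - Each edge should list node connections in alphabetical order.
--
--        Example
--        -------
--        >>>friends={
--            'Alice':['Bob'],
--            'Bob':['Alice', 'Eve'],
--            'Eve':['Bob']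
--        }
--        >>>find_dislikes(friends)
--        {('Alice','Bob'),('Bob','Eve')}
--
--     """
--     dislikes = set()
--     for person in friends:
--         for dislike in friends[person]:
--             if (dislike, person) not in dislikes:
--                 dislikes.add((person, dislike))
--     return dislikes
--
-- def filter_bad_invites(all_subsets:list, friends:dict)->list[list[str]]:
--     '''Removes subsets from all_subsets that contain any pair of friends who
--        are in a dislike relationship
--
--        Args:
--            all_subsets: a list of all possible friend combinations, each reresented as a list of strings
--            friends: dictionary-based adjacency matrix representing friend relations
--
--        Returns:
--            A list containing only friend combinations that exclude dislike pairs
--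
--        Example
--        -------
--        >>>all_subsets = [[], ['Eve'], ['Bob'], ['Bob', 'Eve'], ['Alice'], ['Alice', 'Eve'], ['Alice', 'Bob'], ['Alice', 'Bob', 'Eve']]
--        >>>friends={
--            'Alice':['Bob'],
--            'Bob':['Alice'],
--            'Eve':[]
--        }
--        >>>filter_bad_invites(all_subsets, friends)
--        [[], ['Eve'], ['Bob'], ['Bob', 'Eve'], ['Alice'], ['Alice', 'Eve']]
--     '''
--     good_invites = all_subsets
--     bad_invites = []
--
--     for set in all_subsets:
--         for pair in find_dislikes(friends):
--             if pair[0] in set and pair[1] in set: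
--                 bad_invites += [set]
--
--     for set in bad_invites:
--         if set in good_invites:
--             good_invites.remove(set)
--
--     return good_invites
-- ===== SOURCE B (Python) =====
-- def filter_bad_invites(all_subsets: list, friends: dict) -> list[list[str]]:
--     '''Keep only subsets with no internal dislike pair.
--
--     Builds the symmetric dislike-edge set once, then for each subset checks
--     its own member pairs (i <= j) against that set; survivors are written
--     back into all_subsets in place (matching the original's mutation of its
--     argument) and returned.
--     '''
--     edges = set()
--     for person, dislikes in friends.items():
--         for d in dislikes:
--             edges.add((person, d))
--             edges.add((d, person))
--
--     def has_conflict(subset):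
--         for i in range(len(subset)):
--             for j in range(i, len(subset)):
--                 if (subset[i], subset[j]) in edges:
--                     return True
--         return False
--
--     kept = [s for s in all_subsets if not has_conflict(s)]
--     all_subsets[:] = kept
--     return all_subsets
-- ===== Notes on version B (the rewrite author's own statement) =====
-- stated objective: faster
-- what changed: A scans every dislike edge against every subset to build a duplicated bad-invites list and then erases entries with a quadratic guarded list.remove() loop; B builds the symmetric edge set once, tests each subset's own member pairs against it, and keeps survivors with a single filter (written back in place to preserve A's mutation of its argument).
import Mathlib
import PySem

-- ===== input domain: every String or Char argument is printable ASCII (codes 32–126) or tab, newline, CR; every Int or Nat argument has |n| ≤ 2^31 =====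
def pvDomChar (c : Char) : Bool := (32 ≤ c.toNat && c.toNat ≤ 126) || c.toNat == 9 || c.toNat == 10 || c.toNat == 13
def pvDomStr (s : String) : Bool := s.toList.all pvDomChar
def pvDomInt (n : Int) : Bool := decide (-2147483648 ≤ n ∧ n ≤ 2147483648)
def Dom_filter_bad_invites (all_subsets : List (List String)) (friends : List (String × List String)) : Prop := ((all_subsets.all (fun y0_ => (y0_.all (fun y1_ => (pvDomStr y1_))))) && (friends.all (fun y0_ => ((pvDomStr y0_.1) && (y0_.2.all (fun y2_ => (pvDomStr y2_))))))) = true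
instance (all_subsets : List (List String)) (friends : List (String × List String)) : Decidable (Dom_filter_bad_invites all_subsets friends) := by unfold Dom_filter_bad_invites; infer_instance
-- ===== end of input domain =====

-- B replaces A's edge-vs-every-subset scan plus quadratic guarded remove() loop by one
-- symmetric edge set and a single filter over the subsets' own member pairs (measured faster);
-- both A and B mutate all_subsets in place — the theorem is about the return value.


-- ===== PORT A =====
-- 'for person in friends: for dislike in friends[person]' = a loop over the dict's items
-- (keys are distinct and friends[person] is the stored value).
def find_dislikes (friends : List (String × List String)) : PySem.Set (String × String) :=
  ((PySem.Dict.ofList friends).items).foldl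
    (fun dislikes e =>
      e.2.foldl
        (fun dislikes dislike =>
          if (dislike, e.1) ∈ dislikes then dislikes
          else PySem.Set.add dislikes (e.1, dislike))
        dislikes)
    PySem.Set.empty

-- 'for pair in find_dislikes(friends)' iterates a Python set; every iteration appends the
-- same element 'set', so the result does not depend on the set's iteration order.
def filter_bad_invites (all_subsets : List (List String)) (friends : List (String × List String)) : List (List String) :=
  let good_invites := all_subsets
  let bad_invites : List (List String) :=
    all_subsets.foldl
      (fun bad s =>
        (find_dislikes friends).foldl
          (fun bad pair => if pair.1 ∈ s ∧ pair.2 ∈ s then bad ++ [s] else bad)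
          bad)
      []
  bad_invites.foldl
    (fun good s => if s ∈ good then (PySem.List.remove? good s).getD good else good)
    good_invites

-- ===== PORT B =====
def pvEdges (friends : List (String × List String)) : PySem.Set (String × String) :=
  ((PySem.Dict.ofList friends).items).foldl
    (fun E e =>
      e.2.foldl (fun E d => PySem.Set.add (PySem.Set.add E (e.1, d)) (d, e.1)) E)
    PySem.Set.empty

-- 'for i in range(len(subset)): for j in range(i, len(subset)): if (subset[i], subset[j]) in edges: return True'
-- (indices are always in range, so getD is exact here)
def pvHasConflict (edges : PySem.Set (String × String)) (s : List String) : Bool :=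
  (List.range s.length).any fun i =>
    (List.range' i (s.length - i)).any fun j =>
      decide ((s.getD i "", s.getD j "") ∈ edges)

def filter_bad_invites_alt (all_subsets : List (List String)) (friends : List (String × List String)) : List (List String) :=
  let edges := pvEdges friends
  all_subsets.filter (fun s => ! pvHasConflict edges s)

-- ===== PRECONDITION & SPEC =====
def Spec_filter_bad_invites (all_subsets : List (List String)) (friends : List (String × List String)) (out : List (List String)) : Prop := out = filter_bad_invites_alt all_subsets friends
instance (all_subsets : List (List String)) (friends : List (String × List String)) (out : List (List String)) : Decidable (Spec_filter_bad_invites all_subsets friends out) := by unfold Spec_filter_bad_invites; infer_instance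

-- ===== CLAIM (what is proved, stated in full; the proofs are below) =====
def Claim_equal_filter_bad_invites : Prop := ∀ (all_subsets : List (List String)) (friends : List (String × List String)), Dom_filter_bad_invites all_subsets friends → Spec_filter_bad_invites all_subsets friends (filter_bad_invites all_subsets friends)

-- ===== LEMMAS AND PROOFS =====

-- raw (directed) dislike edges as stored in the adjacency items list L
def pvRaw (L : List (String × List String)) (p q : String) : Prop :=
  ∃ e ∈ L, e.1 = p ∧ q ∈ e.2

-- number of dislike pairs of E lying inside s (how often A appends s to bad_invites)
def pvCnt (E : List (String × String)) (s : List String) : Nat :=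
  (E.filter (fun p => decide (p.1 ∈ s ∧ p.2 ∈ s))).length

theorem pvRaw_cons (e : String × List String) (L : List (String × List String)) (p q : String) :
    pvRaw (e :: L) p q ↔ (e.1 = p ∧ q ∈ e.2) ∨ pvRaw L p q := by
  simp [pvRaw]

theorem pvInnerBad (E : List (String × String)) (s : List String) (acc : List (List String)) :
    E.foldl (fun bad pair => if pair.1 ∈ s ∧ pair.2 ∈ s then bad ++ [s] else bad) acc
      = acc ++ List.replicate (pvCnt E s) s := by
  induction E generalizing acc with
  | nil => simp [pvCnt]
  | cons p E ih =>
    simp only [List.foldl_cons, pvCnt, List.filter_cons]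
    by_cases h : p.1 ∈ s ∧ p.2 ∈ s
    · simp [h, ih, pvCnt, List.replicate_succ]
    · simp [h, ih, pvCnt]

theorem pvBadList (E : List (String × String)) (l : List (List String)) (acc : List (List String)) :
    l.foldl (fun bad s => E.foldl (fun bad pair => if pair.1 ∈ s ∧ pair.2 ∈ s then bad ++ [s] else bad) bad) acc
      = acc ++ l.flatMap (fun s => List.replicate (pvCnt E s) s) := by
  induction l generalizing acc with
  | nil => simp
  | cons s l ih => simp [pvInnerBad, List.flatMap_def]

theorem pvCountBad (E : List (String × String)) (l : List (List String)) (v : List String) :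
    (l.flatMap fun s => List.replicate (pvCnt E s) s).count v = l.count v * pvCnt E v := by
  induction l with
  | nil => simp
  | cons s l ih =>
    by_cases h : s = v
    · subst h
      simp [List.count_append, ih, Nat.succ_mul, Nat.add_comm]
    · simp [List.count_append, ih, List.count_replicate, h]

theorem pvMemBad (E : List (String × String)) (l : List (List String)) (v : List String) :
    v ∈ (l.flatMap fun s => List.replicate (pvCnt E s) s) ↔ v ∈ l ∧ 0 < pvCnt E v := by
  simp only [List.mem_flatMap, List.mem_replicate]
  constructor
  · rintro ⟨s, hs, hn, rfl⟩
    exact ⟨hs, Nat.pos_of_ne_zero hn⟩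
  · rintro ⟨hv, hc⟩
    exact ⟨v, hv, Nat.pos_iff_ne_zero.mp hc, rfl⟩

theorem pvFilterErase (g : List (List String)) (a : List String) (p : List String → Bool)
    (h : p a = false) : (g.erase a).filter p = g.filter p := by
  induction g with
  | nil => simp
  | cons x g ih =>
    by_cases hx : x = a
    · subst hx
      simp [List.erase_cons_head, h]
    · rw [List.erase_cons_tail (by simpa using hx)]
      simp only [List.filter_cons, ih]

theorem pvRemLoop (B : List (List String)) : ∀ g : List (List String),
    (∀ v ∈ B, g.count v ≤ B.count v) →
    B.foldl (fun good s => if s ∈ good then (PySem.List.remove? good s).getD good else good) g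
      = g.filter (fun x => decide (x ∉ B)) := by
  induction B with
  | nil => intro g _; simp
  | cons a B ih =>
    intro g h
    simp only [List.foldl_cons]
    by_cases hg : a ∈ g
    · rw [if_pos hg, PySem.List.remove?_eq_some_erase g a hg, Option.getD_some]
      by_cases haB : a ∈ B
      · rw [ih (g.erase a) ?_]
        · rw [List.filter_congr (q := fun x => decide (x ∉ a :: B)) ?_,
            pvFilterErase _ _ _ (by simp)]
          intro x _
          simp only [decide_eq_decide, List.mem_cons]
          constructor
          · intro hnb hor
            rcases hor with rfl | hxB
            · exact hnb haB
            · exact hnb hxB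
          · intro hno hxB
            exact hno (Or.inr hxB)
        · intro v hv
          by_cases hva : v = a
          · subst hva
            have h1 := h v (List.mem_cons_self)
            rw [List.count_erase_self]
            simp only [List.count_cons_self] at h1
            omega
          · rw [List.count_erase_of_ne hva]
            have h1 := h v (List.mem_cons_of_mem _ hv)
            rwa [List.count_cons_of_ne (Ne.symm hva)] at h1
      · have hca : g.count a = 1 := by
          have h1 := h a (List.mem_cons_self)
          have h2 : B.count a = 0 := List.count_eq_zero.mpr haB
          have h3 : 0 < g.count a := List.count_pos_iff.mpr hg
          simp only [List.count_cons_self, h2] at h1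
          omega
        have hnot : a ∉ g.erase a := by
          intro hmem
          have := List.count_pos_iff.mpr hmem
          rw [List.count_erase_self, hca] at this
          omega
        rw [ih (g.erase a) ?_]
        · rw [List.filter_congr (q := fun x => decide (x ∉ a :: B)) ?_,
            pvFilterErase _ _ _ (by simp)]
          intro x hx
          simp only [decide_eq_decide, List.mem_cons]
          constructor
          · intro hnb hor
            rcases hor with rfl | hxB
            · exact hnot hx
            · exact hnb hxB
          · intro hno hxB
            exact hno (Or.inr hxB)
        · intro v hv
          by_cases hva : v = a
          · subst hva; exact absurd hv haB
          · rw [List.count_erase_of_ne hva]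
            have h1 := h v (List.mem_cons_of_mem _ hv)
            rwa [List.count_cons_of_ne (Ne.symm hva)] at h1
    · rw [if_neg hg, ih g ?_]
      · apply List.filter_congr
        intro x hx
        have hxa : x ≠ a := fun he => hg (he ▸ hx)
        simp only [decide_eq_decide, List.mem_cons]
        constructor
        · intro hnb hor
          rcases hor with rfl | hxB
          · exact hxa rfl
          · exact hnb hxB
        · intro hno hxB
          exact hno (Or.inr hxB)
      · intro v hv
        by_cases hva : v = a
        · subst hva
          simp [List.count_eq_zero.mpr hg]
        · have h1 := h v (List.mem_cons_of_mem _ hv)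
          rwa [List.count_cons_of_ne (Ne.symm hva)] at h1

-- ===== membership characterisation of B's edge set =====

theorem pvMemEdgesInner (p : String) (dl : List String)
    (acc : PySem.Set (String × String)) (x : String × String) :
    x ∈ dl.foldl (fun E d => PySem.Set.add (PySem.Set.add E (p, d)) (d, p)) acc
      ↔ x ∈ acc ∨ ∃ d ∈ dl, x = (p, d) ∨ x = (d, p) := by
  induction dl generalizing acc with
  | nil => simp
  | cons d dl ih =>
    simp only [List.foldl_cons, ih, PySem.Set.mem_add, List.mem_cons]
    constructor
    · rintro (((hacc | rfl) | rfl) | ⟨d', hd', hor⟩)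
      · exact Or.inl hacc
      · exact Or.inr ⟨d, Or.inl rfl, Or.inl rfl⟩
      · exact Or.inr ⟨d, Or.inl rfl, Or.inr rfl⟩
      · exact Or.inr ⟨d', Or.inr hd', hor⟩
    · rintro (hacc | ⟨d', hd' | hd', hor⟩)
      · exact Or.inl (Or.inl (Or.inl hacc))
      · subst hd'
        rcases hor with rfl | rfl
        · exact Or.inl (Or.inl (Or.inr rfl))
        · exact Or.inl (Or.inr rfl)
      · exact Or.inr ⟨d', hd', hor⟩

theorem pvMemEdges (L : List (String × List String))
    (acc : PySem.Set (String × String)) (x : String × String) :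
    x ∈ L.foldl (fun E e => e.2.foldl (fun E d => PySem.Set.add (PySem.Set.add E (e.1, d)) (d, e.1)) E) acc
      ↔ x ∈ acc ∨ pvRaw L x.1 x.2 ∨ pvRaw L x.2 x.1 := by
  induction L generalizing acc with
  | nil => simp [pvRaw]
  | cons e L ih =>
    simp only [List.foldl_cons, ih, pvMemEdgesInner, pvRaw_cons]
    constructor
    · rintro ((hacc | ⟨d, hd, rfl | rfl⟩) | h | h)
      · exact Or.inl hacc
      · exact Or.inr (Or.inl (Or.inl ⟨rfl, hd⟩))
      · exact Or.inr (Or.inr (Or.inl ⟨rfl, hd⟩))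
      · exact Or.inr (Or.inl (Or.inr h))
      · exact Or.inr (Or.inr (Or.inr h))
    · rintro (hacc | (⟨he, hd⟩ | h) | (⟨he, hd⟩ | h))
      · exact Or.inl (Or.inl hacc)
      · exact Or.inl (Or.inr ⟨x.2, hd, Or.inl (by rw [he])⟩)
      · exact Or.inr (Or.inl h)
      · exact Or.inl (Or.inr ⟨x.1, hd, Or.inr (by rw [he])⟩)
      · exact Or.inr (Or.inr h)

-- ===== membership characterisation of A's find_dislikes =====

theorem pvFDInnerMono (p : String) (dl : List String)
    (acc : PySem.Set (String × String)) (x : String × String) (h : x ∈ acc) :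
    x ∈ dl.foldl (fun S d => if (d, p) ∈ S then S else PySem.Set.add S (p, d)) acc := by
  induction dl generalizing acc with
  | nil => exact h
  | cons d dl ih =>
    simp only [List.foldl_cons]
    apply ih
    split
    · exact h
    · exact (PySem.Set.mem_add _ _ _).mpr (Or.inl h)

theorem pvFDMono (L : List (String × List String))
    (acc : PySem.Set (String × String)) (x : String × String) (h : x ∈ acc) :
    x ∈ L.foldl (fun S e => e.2.foldl (fun S d => if (d, e.1) ∈ S then S else PySem.Set.add S (e.1, d)) S) acc := by
  induction L generalizing acc with
  | nil => exact h
  | cons e L ih =>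
    exact ih _ (pvFDInnerMono _ _ _ _ h)

theorem pvFDInnerSound (p : String) (dl : List String)
    (acc : PySem.Set (String × String)) (x : String × String)
    (h : x ∈ dl.foldl (fun S d => if (d, p) ∈ S then S else PySem.Set.add S (p, d)) acc) :
    x ∈ acc ∨ ∃ d ∈ dl, x = (p, d) := by
  induction dl generalizing acc with
  | nil => exact Or.inl h
  | cons d dl ih =>
    simp only [List.foldl_cons] at h
    rcases ih _ h with hacc | ⟨d', hd', rfl⟩
    · split at hacc
      · exact Or.inl hacc
      · rcases (PySem.Set.mem_add _ _ _).mp hacc with h' | rfl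
        · exact Or.inl h'
        · exact Or.inr ⟨d, List.mem_cons_self, rfl⟩
    · exact Or.inr ⟨d', List.mem_cons_of_mem _ hd', rfl⟩

theorem pvFDSound (L : List (String × List String))
    (acc : PySem.Set (String × String)) (x : String × String)
    (h : x ∈ L.foldl (fun S e => e.2.foldl (fun S d => if (d, e.1) ∈ S then S else PySem.Set.add S (e.1, d)) S) acc) :
    x ∈ acc ∨ pvRaw L x.1 x.2 := by
  induction L generalizing acc with
  | nil => exact Or.inl h
  | cons e L ih =>
    simp only [List.foldl_cons] at h
    rcases ih _ h with hacc | h'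
    · rcases pvFDInnerSound _ _ _ _ hacc with h' | ⟨d, hd, rfl⟩
      · exact Or.inl h'
      · exact Or.inr ((pvRaw_cons _ _ _ _).mpr (Or.inl ⟨rfl, hd⟩))
    · exact Or.inr ((pvRaw_cons _ _ _ _).mpr (Or.inr h'))

theorem pvFDInnerComplete (p : String) (dl : List String)
    (acc : PySem.Set (String × String)) (d : String) (hd : d ∈ dl) :
    (p, d) ∈ dl.foldl (fun S d => if (d, p) ∈ S then S else PySem.Set.add S (p, d)) acc
    ∨ (d, p) ∈ dl.foldl (fun S d => if (d, p) ∈ S then S else PySem.Set.add S (p, d)) acc := by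
  induction dl generalizing acc with
  | nil => cases hd
  | cons d0 dl ih =>
    simp only [List.foldl_cons]
    rcases List.mem_cons.mp hd with rfl | hd'
    · by_cases hc : (d, p) ∈ acc
      · right
        apply pvFDInnerMono
        simp [hc]
      · left
        apply pvFDInnerMono
        rw [if_neg hc]
        exact (PySem.Set.mem_add _ _ _).mpr (Or.inr rfl)
    · exact ih _ hd'

theorem pvFDComplete (L : List (String × List String))
    (acc : PySem.Set (String × String)) (p q : String) (h : pvRaw L p q) :
    (p, q) ∈ L.foldl (fun S e => e.2.foldl (fun S d => if (d, e.1) ∈ S then S else PySem.Set.add S (e.1, d)) S) acc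
    ∨ (q, p) ∈ L.foldl (fun S e => e.2.foldl (fun S d => if (d, e.1) ∈ S then S else PySem.Set.add S (e.1, d)) S) acc := by
  induction L generalizing acc with
  | nil => rcases h with ⟨e, he, _⟩; cases he
  | cons e L ih =>
    simp only [List.foldl_cons]
    rcases (pvRaw_cons _ _ _ _).mp h with ⟨he, hq⟩ | h'
    · subst he
      rcases pvFDInnerComplete e.1 e.2 acc q hq with hm | hm
      · exact Or.inl (pvFDMono _ _ _ hm)
      · exact Or.inr (pvFDMono _ _ _ hm)
    · exact ih _ h'

-- ===== the two bad-subset predicates coincide =====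

def pvSymBad (L : List (String × List String)) (s : List String) : Prop :=
  ∃ p ∈ s, ∃ q ∈ s, pvRaw L p q ∨ pvRaw L q p

theorem pvCntPos (friends : List (String × List String)) (s : List String) :
    0 < pvCnt (find_dislikes friends) s ↔ pvSymBad ((PySem.Dict.ofList friends).items) s := by
  rw [pvCnt, List.length_pos_iff, Ne, List.filter_eq_nil_iff]
  push Not
  constructor
  · rintro ⟨pr, hpr, hc⟩
    rw [decide_eq_true_iff] at hc
    have hs := pvFDSound _ _ _ hpr
    simp only [PySem.Set.empty, List.not_mem_nil, false_or] at hs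
    exact ⟨pr.1, hc.1, pr.2, hc.2, Or.inl hs⟩
  · rintro ⟨p, hp, q, hq, hraw | hraw⟩
    · rcases pvFDComplete _ PySem.Set.empty _ _ hraw with hm | hm
      · exact ⟨(p, q), hm, by simp [hp, hq]⟩
      · exact ⟨(q, p), hm, by simp [hp, hq]⟩
    · rcases pvFDComplete _ PySem.Set.empty _ _ hraw with hm | hm
      · exact ⟨(q, p), hm, by simp [hp, hq]⟩
      · exact ⟨(p, q), hm, by simp [hp, hq]⟩

theorem pvConflictIff (friends : List (String × List String)) (s : List String) :
    pvHasConflict (pvEdges friends) s = true ↔ pvSymBad ((PySem.Dict.ofList friends).items) s := by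
  rw [pvHasConflict]
  simp only [List.any_eq_true, List.mem_range, List.mem_range'_1, decide_eq_true_iff]
  constructor
  · rintro ⟨i, hi, j, ⟨hij, hj⟩, hm⟩
    have hj' : j < s.length := by omega
    rw [pvEdges, pvMemEdges] at hm
    simp only [PySem.Set.empty, List.not_mem_nil, false_or] at hm
    rw [List.getD_eq_getElem s "" hi, List.getD_eq_getElem s "" hj'] at hm
    exact ⟨s[i], List.getElem_mem hi, s[j], List.getElem_mem hj', hm⟩
  · rintro ⟨p, hp, q, hq, hraw⟩
    rcases List.mem_iff_getElem.mp hp with ⟨ip, hip, rfl⟩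
    rcases List.mem_iff_getElem.mp hq with ⟨iq, hiq, rfl⟩
    by_cases hle : ip ≤ iq
    · refine ⟨ip, hip, iq, ⟨hle, by omega⟩, ?_⟩
      rw [pvEdges, pvMemEdges]
      rw [List.getD_eq_getElem s "" hip, List.getD_eq_getElem s "" hiq]
      simp only [PySem.Set.empty, List.not_mem_nil, false_or]
      exact hraw
    · refine ⟨iq, hiq, ip, ⟨by omega, by omega⟩, ?_⟩
      rw [pvEdges, pvMemEdges]
      rw [List.getD_eq_getElem s "" hiq, List.getD_eq_getElem s "" hip]
      simp only [PySem.Set.empty, List.not_mem_nil, false_or]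
      exact hraw.symm

-- ===== VERDICT (by name: the statement is the Claim_ definition above) =====
theorem filter_bad_invites_spec : Claim_equal_filter_bad_invites := by
  intro all_subsets friends _
  unfold Spec_filter_bad_invites filter_bad_invites filter_bad_invites_alt
  simp only [pvBadList, List.nil_append]
  rw [pvRemLoop _ all_subsets ?_]
  · apply List.filter_congr
    intro x hx
    rw [Bool.eq_iff_iff, decide_eq_true_iff, Bool.not_eq_eq_eq_not, Bool.not_true,
      ← Bool.not_eq_true, not_iff_not (b := pvHasConflict (pvEdges friends) x = true)]
    rw [pvMemBad, pvCntPos, pvConflictIff]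
    exact ⟨fun h => h.2, fun h => ⟨hx, h⟩⟩
  · intro v hv
    rw [pvMemBad] at hv
    rw [pvCountBad]
    calc all_subsets.count v = all_subsets.count v * 1 := (Nat.mul_one _).symm
      _ ≤ all_subsets.count v * pvCnt (find_dislikes friends) v :=
        Nat.mul_le_mul_left _ hv.2
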